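-- pv_equiv track=rewrite | github.com/Bug-001/Falcon-MIA | obf_multi_techniques.py | get_folder_name
-- ===== SOURCE A (Python) =====
-- from typing import Dict, List, Tuple, Any
--
-- def get_folder_name(info: Dict[str, str]) -> str:
--     parts = []
--
--     # 优先添加task和dataset
--     if 'task' in info:
--         parts.append(f"task({info['task']})")
--     if 'dataset' in info:
--         parts.append(f"dataset({info['dataset']})")
--
--     # 添加其他键值对
--     other_parts = []
--     for key, value in sorted(info.items()):
--         if key not in ['task', 'dataset']:
--             other_parts.append(f"{key}({value})")
--
--     parts.extend(other_parts)
--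
--     return '--'.join(parts)
-- ===== SOURCE B (Python) =====
-- def get_folder_name(info):
--     def key(kv):
--         k = kv[0]
--         return (0 if k == 'task' else 1 if k == 'dataset' else 2, k)
--     return '--'.join(f"{k}({v})" for k, v in sorted(info.items(), key=key))
-- ===== Notes on version B (the rewrite author's own statement) =====
-- stated objective: idiomatic
-- what changed: Replaces the two-phase build (explicit task/dataset membership guards plus a separate filtered loop over sorted items) with one comprehension over a single sort keyed by (priority-rank, key).
import Mathlib
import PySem

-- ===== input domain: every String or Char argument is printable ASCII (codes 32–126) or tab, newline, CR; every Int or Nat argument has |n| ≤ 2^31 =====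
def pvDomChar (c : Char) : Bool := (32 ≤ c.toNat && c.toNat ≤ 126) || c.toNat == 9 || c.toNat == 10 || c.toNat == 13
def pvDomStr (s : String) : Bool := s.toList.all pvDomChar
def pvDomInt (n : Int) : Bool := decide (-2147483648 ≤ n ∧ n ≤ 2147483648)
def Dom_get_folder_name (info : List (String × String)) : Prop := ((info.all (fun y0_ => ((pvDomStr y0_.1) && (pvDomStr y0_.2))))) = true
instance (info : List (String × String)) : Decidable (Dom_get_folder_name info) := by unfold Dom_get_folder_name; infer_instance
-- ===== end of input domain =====

-- B replaces A's two-phase build (membership guards + separate filtered loop) by one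
-- sort over info with a (priority-rank, key) sort key and a single map-join (idiomatic).


-- ===== PORT A =====
-- 'sorted(info.items())' sorts the (key, value) pairs by Python tuple order = lexicographic:
-- ported as PySem.List.sorted with the Lex (String × String) key (exact for unique-key dicts).
def get_folder_name (info : List (String × String)) : String :=
  let parts : List String := []
  let parts : List String :=
    match List.lookup "task" info with       -- 'task' in info / info['task'] (dict: first match)
    | some v => parts ++ ["task(" ++ v ++ ")"]
    | none => parts
  let parts : List String :=
    match List.lookup "dataset" info with
    | some v => parts ++ ["dataset(" ++ v ++ ")"]
    | none => parts
  let other_parts : List String :=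
    (PySem.List.sorted info (fun kv => toLex kv)).foldl
      (fun acc kv =>
        if !(kv.1 == "task" || kv.1 == "dataset") then acc ++ [kv.1 ++ "(" ++ kv.2 ++ ")"]
        else acc) []
  PySem.Str.join "--" (parts ++ other_parts)

-- ===== PORT B =====
def pvRank (k : String) : Int := if k == "task" then 0 else if k == "dataset" then 1 else 2

def get_folder_name_alt (info : List (String × String)) : String :=
  PySem.Str.join "--"
    ((PySem.List.sorted info (fun kv => toLex (pvRank kv.1, kv.1))).map
      (fun kv => kv.1 ++ "(" ++ kv.2 ++ ")"))

-- ===== PRECONDITION & SPEC =====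
-- Pre_ excludes association lists with duplicate keys: they do not represent a Python dict
-- (A's parameter is a dict, which cannot hold duplicate keys), so A's behaviour there is undefined.
def Pre_get_folder_name (info : List (String × String)) : Prop := (info.map Prod.fst).Nodup
instance (info : List (String × String)) : Decidable (Pre_get_folder_name info) := by unfold Pre_get_folder_name; infer_instance
def pvWitness_get_folder_name : (List (String × String)) := [("task", "mia"), ("dataset", "agnews"), ("alpha", "0.5")]

def Spec_get_folder_name (info : List (String × String)) (out : String) : Prop := out = get_folder_name_alt info
instance (info : List (String × String)) (out : String) : Decidable (Spec_get_folder_name info out) := by unfold Spec_get_folder_name; infer_instance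

-- ===== CLAIM (what is proved, stated in full; the proofs are below) =====
def Claim_equal_get_folder_name : Prop := ∀ (info : List (String × String)), Dom_get_folder_name info → Pre_get_folder_name info → Spec_get_folder_name info (get_folder_name info)

-- ===== LEMMAS AND PROOFS =====

-- With unique keys, the filter on a key equals what dict lookup (first match) finds.
theorem pv_filter_eq_lookup (k : String) (info : List (String × String))
    (h : (info.map Prod.fst).Nodup) :
    info.filter (fun kv => kv.1 == k) =
      (match List.lookup k info with
       | some v => [(k, v)]
       | none => ([] : List (String × String))) := by
  induction info with
  | nil => simp [List.lookup]
  | cons x t ih =>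
    obtain ⟨a, b⟩ := x
    simp only [List.map_cons, List.nodup_cons, List.mem_map] at h
    obtain ⟨hx, ht⟩ := h
    by_cases hk : a = k
    · subst hk
      have hft : List.filter (fun kv => kv.1 == a) t = [] := by
        apply List.filter_eq_nil_iff.mpr
        intro p hp hpa
        exact hx ⟨p, hp, beq_iff_eq.mp hpa⟩
      simp [List.lookup, hft]
    · have hka : (k == a) = false := by simp [Ne.symm hk]
      simp [List.lookup, hk, hka, ih ht]

-- Three-way disjoint partition permutation.
theorem pv_perm_partition (l : List (String × String)) :
    (l.filter (fun kv => kv.1 == "task") ++ l.filter (fun kv => kv.1 == "dataset")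
      ++ l.filter (fun kv => !(kv.1 == "task" || kv.1 == "dataset"))).Perm l := by
  induction l with
  | nil => simp
  | cons x t ih =>
    by_cases h1 : x.1 = "task"
    · have c2 : x.1 ≠ "dataset" := by simp [h1]
      simpa [List.filter_cons, h1, c2] using ih.cons x
    · by_cases h2 : x.1 = "dataset"
      · simp only [List.filter_cons]
        have c1 : (x.1 == "task") = false := by simp [h1]
        have c2 : (x.1 == "dataset") = true := by simp [h2]
        simp only [c1, c2, Bool.false_or, Bool.not_true, Bool.false_eq_true, if_false, if_true]
        refine List.Perm.trans ?_ (ih.cons x)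
        simp only [List.append_assoc, List.cons_append]
        exact List.perm_middle
      · simp only [List.filter_cons]
        have c1 : (x.1 == "task") = false := by simp [h1]
        have c2 : (x.1 == "dataset") = false := by simp [h2]
        simp only [c1, c2, Bool.or_self, Bool.not_false, Bool.false_eq_true, if_false, if_true]
        refine List.Perm.trans ?_ (ih.cons x)
        simp only [List.append_assoc]
        refine List.Perm.trans (List.Perm.append_left _ List.perm_middle) ?_
        exact List.perm_middle

-- B's single (rank, key) sort equals: task entry, dataset entry, then the other entries of
-- the lexicographic sort, in order.
theorem pv_sortedB_eq (info : List (String × String)) (h : (info.map Prod.fst).Nodup) :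
    PySem.List.sorted info (fun kv => toLex (pvRank kv.1, kv.1)) =
      info.filter (fun kv => kv.1 == "task") ++ info.filter (fun kv => kv.1 == "dataset")
        ++ (PySem.List.sorted info (fun kv => toLex kv)).filter
            (fun kv => !(kv.1 == "task" || kv.1 == "dataset")) := by
  apply PySem.List.sorted_eq_of_perm_of_pairwise_lt
  · -- permutation
    refine List.Perm.trans ?_ (pv_perm_partition info)
    refine List.Perm.append_left _ ?_
    exact (PySem.List.sorted_perm info (fun kv => toLex kv) false).filter _
  · -- strict pairwise under B's key
    -- the "others" block is strictly increasing on keys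
    have hOsub : ((PySem.List.sorted info (fun kv => toLex kv)).filter
        (fun kv => !(kv.1 == "task" || kv.1 == "dataset"))).Sublist
        (PySem.List.sorted info (fun kv => toLex kv)) := List.filter_sublist
    have hSnodup : ((PySem.List.sorted info (fun kv => toLex kv)).map Prod.fst).Nodup :=
      (((PySem.List.sorted_perm info (fun kv => toLex kv) false).map Prod.fst).nodup_iff).mpr h
    have hnodupO : (((PySem.List.sorted info (fun kv => toLex kv)).filter
          (fun kv => !(kv.1 == "task" || kv.1 == "dataset"))).map Prod.fst).Nodup :=
      List.Nodup.sublist (List.Sublist.map Prod.fst hOsub) hSnodup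
    have hOpair : List.Pairwise (fun a b : String × String => a.1 < b.1)
        ((PySem.List.sorted info (fun kv => toLex kv)).filter
          (fun kv => !(kv.1 == "task" || kv.1 == "dataset"))) := by
      have hp := List.Pairwise.sublist hOsub
        (PySem.List.sorted_pairwise info (fun kv => toLex kv))
      have hne := List.pairwise_map.mp hnodupO
      refine (hp.and hne).imp ?_
      rintro a b ⟨hab, hne2⟩
      rcases (Prod.Lex.le_iff).mp hab with hlt | ⟨heq, _⟩
      · exact hlt
      · exact absurd heq hne2
    have hOrank : ∀ b ∈ ((PySem.List.sorted info (fun kv => toLex kv)).filter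
          (fun kv => !(kv.1 == "task" || kv.1 == "dataset"))), pvRank b.1 = 2 := by
      intro b hb
      have hb' := List.of_mem_filter hb
      simp only [Bool.not_eq_true', Bool.or_eq_false_iff, beq_eq_false_iff_ne] at hb'
      simp [pvRank, hb'.1, hb'.2]
    have hO' : List.Pairwise
        (fun a b : String × String => toLex (pvRank a.1, a.1) < toLex (pvRank b.1, b.1))
        ((PySem.List.sorted info (fun kv => toLex kv)).filter
          (fun kv => !(kv.1 == "task" || kv.1 == "dataset"))) := by
      refine hOpair.imp_of_mem ?_
      intro a b ha hb hlt
      exact Prod.Lex.lt_iff.mpr (Or.inr ⟨by simp [hOrank a ha, hOrank b hb], hlt⟩)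
    have hOlt : ∀ r : Int, ∀ s : String, r < 2 →
        ∀ b ∈ ((PySem.List.sorted info (fun kv => toLex kv)).filter
          (fun kv => !(kv.1 == "task" || kv.1 == "dataset"))),
        toLex (r, s) < toLex (pvRank b.1, b.1) := by
      intro r s hr b hb
      exact Prod.Lex.lt_iff.mpr (Or.inl (by simpa [hOrank b hb] using hr))
    have hTe : info.filter (fun kv => kv.1 == "task") = [] ∨
        ∃ v, info.filter (fun kv => kv.1 == "task") = [("task", v)] := by
      rw [pv_filter_eq_lookup "task" info h]
      cases List.lookup "task" info
      · exact Or.inl rfl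
      · exact Or.inr ⟨_, rfl⟩
    have hDe : info.filter (fun kv => kv.1 == "dataset") = [] ∨
        ∃ v, info.filter (fun kv => kv.1 == "dataset") = [("dataset", v)] := by
      rw [pv_filter_eq_lookup "dataset" info h]
      cases List.lookup "dataset" info
      · exact Or.inl rfl
      · exact Or.inr ⟨_, rfl⟩
    rcases hTe with hTe | ⟨tv, hTe⟩ <;> rcases hDe with hDe | ⟨dv, hDe⟩ <;>
      rw [hTe, hDe] <;>
      simp only [List.nil_append, List.cons_append,
        List.pairwise_cons, List.mem_cons]
    · exact hO'
    · refine ⟨?_, hO'⟩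
      intro b hb
      exact hOlt _ _ (by simp [pvRank]) b hb
    · refine ⟨?_, hO'⟩
      intro b hb
      exact hOlt _ _ (by simp [pvRank]) b hb
    · refine ⟨?_, ?_, hO'⟩
      · intro b hb
        rcases hb with hb | hb
        · subst hb
          exact Prod.Lex.lt_iff.mpr (Or.inl (by simp [pvRank]))
        · exact hOlt _ _ (by decide) b hb
      · intro b hb
        exact hOlt _ _ (by simp [pvRank]) b hb

-- ===== VERDICT (by name: the statement is the Claim_ definition above) =====
theorem get_folder_name_spec : Claim_equal_get_folder_name := by
  intro info _hdom hpre
  unfold Spec_get_folder_name get_folder_name get_folder_name_alt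
  dsimp only
  rw [pv_sortedB_eq info hpre]
  simp only [PySem.List.foldl_append_if]
  rw [List.map_append, List.map_append]
  rw [pv_filter_eq_lookup "task" info hpre, pv_filter_eq_lookup "dataset" info hpre]
  cases List.lookup "task" info <;> cases List.lookup "dataset" info <;> simp
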